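-- pv_equiv track=rewrite | github.com/wlool8793-crypto/lool- | deep-agent/app/agents/nodes/planning_node.py | _calculate_overall_risk
-- ===== SOURCE A (Python) =====
-- from typing import Dict, Any, List, Optional, Tuple
--
-- def _calculate_overall_risk(risks: List[Dict[str, Any]]) -> str:
--     """
--     Calculate overall risk level
--     """
--     if not risks:
--         return "low"
--
--     risk_levels = [risk["level"] for risk in risks]
--     if "high" in risk_levels:
--         return "high"
--     elif "medium" in risk_levels:
--         return "medium"
--     else:
--         return "low"
-- ===== SOURCE B (Python) =====
-- def _calculate_overall_risk(risks):
--     """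
--     Calculate overall risk level
--     """
--     rank = {"high": 2, "medium": 1}
--     best = max((rank.get(risk["level"], 0) for risk in risks), default=0)
--     return {2: "high", 1: "medium"}.get(best, "low")
-- ===== Notes on version B (the rewrite author's own statement) =====
-- stated objective: idiomatic
-- what changed: Replaces materializing the list of levels and two ordered membership scans with a single running-maximum over a numeric rank map, then maps the best rank back to a label.
import Mathlib
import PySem

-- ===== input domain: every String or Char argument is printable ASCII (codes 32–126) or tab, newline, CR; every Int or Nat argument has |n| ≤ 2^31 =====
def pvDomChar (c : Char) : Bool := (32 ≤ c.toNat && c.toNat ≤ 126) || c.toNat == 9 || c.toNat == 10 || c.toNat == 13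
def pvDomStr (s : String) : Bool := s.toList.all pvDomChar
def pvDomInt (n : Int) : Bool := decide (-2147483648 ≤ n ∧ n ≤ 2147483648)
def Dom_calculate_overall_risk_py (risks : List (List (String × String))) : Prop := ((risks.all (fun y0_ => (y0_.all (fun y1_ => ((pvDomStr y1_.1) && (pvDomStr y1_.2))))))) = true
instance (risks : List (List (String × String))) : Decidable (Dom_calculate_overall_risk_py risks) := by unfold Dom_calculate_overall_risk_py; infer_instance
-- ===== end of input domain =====

-- B replaces the materialized level list and ordered membership tests with a running maximum
-- over a numeric rank, mapped back to a label (idiomatic; same O(n) cost).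


-- ===== PORT A =====
-- risk["level"] (KeyError if missing → excluded by Pre_; `getD ""` is only reached outside Pre_)
def pvLevel (r : List (String × String)) : String :=
  ((PySem.Dict.ofList r).get? "level").getD ""

def calculate_overall_risk_py (risks : List (List (String × String))) : String :=
  if risks = [] then "low"
  else
    let risk_levels := risks.map (fun risk => pvLevel risk)
    if risk_levels.contains "high" then "high"
    else if risk_levels.contains "medium" then "medium"
    else "low"

-- ===== PORT B =====
-- rank.get(risk["level"], 0) for the literal dict {"high": 2, "medium": 1}
def pvRank (l : String) : Int :=
  PySem.Dict.getD (PySem.Dict.ofList [("high", 2), ("medium", 1)]) l 0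

def calculate_overall_risk_py_alt (risks : List (List (String × String))) : String :=
  let best := risks.foldl (fun a risk => max a (pvRank (pvLevel risk))) (0 : Int)
  if best = 2 then "high" else if best = 1 then "medium" else "low"

-- ===== PRECONDITION & SPEC =====
-- Pre_ excludes exactly the inputs where some risk dict lacks the "level" key: A raises KeyError there.
def Pre_calculate_overall_risk_py (risks : List (List (String × String))) : Prop :=
  ∀ r ∈ risks, ((PySem.Dict.ofList r).get? "level").isSome = true
instance (risks : List (List (String × String))) : Decidable (Pre_calculate_overall_risk_py risks) := by unfold Pre_calculate_overall_risk_py; infer_instance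
def pvWitness_calculate_overall_risk_py : (List (List (String × String))) := [[("level", "high")], [("level", "low")]]

def Spec_calculate_overall_risk_py (risks : List (List (String × String))) (out : String) : Prop := out = calculate_overall_risk_py_alt risks
instance (risks : List (List (String × String))) (out : String) : Decidable (Spec_calculate_overall_risk_py risks out) := by unfold Spec_calculate_overall_risk_py; infer_instance

-- ===== CLAIM (what is proved, stated in full; the proofs are below) =====
def Claim_equal_calculate_overall_risk_py : Prop := ∀ (risks : List (List (String × String))), Dom_calculate_overall_risk_py risks → Pre_calculate_overall_risk_py risks → Spec_calculate_overall_risk_py risks (calculate_overall_risk_py risks)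

-- ===== LEMMAS AND PROOFS =====
lemma pvRank_eq (l : String) :
    pvRank l = if l = "high" then 2 else if l = "medium" then 1 else 0 := by
  have h : (PySem.Dict.ofList [("high", (2 : Int)), ("medium", 1)]).items
      = [("high", 2), ("medium", 1)] := by decide
  by_cases h1 : l = "high"
  · subst h1; decide
  · by_cases h2 : l = "medium"
    · subst h2; decide
    · unfold pvRank
      simp only [PySem.Dict.getD, PySem.Dict.get?, h, List.find?]
      rw [show (("high" == l) = false) from beq_eq_false_iff_ne.mpr (fun e => h1 e.symm),
          show (("medium" == l) = false) from beq_eq_false_iff_ne.mpr (fun e => h2 e.symm)]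
      simp [h1, h2]

lemma pvRank_nonneg (l : String) : 0 ≤ pvRank l := by
  rw [pvRank_eq]; split_ifs <;> norm_num

lemma foldl_max_init (risks : List (List (String × String))) (a : Int) (ha : 0 ≤ a) :
    risks.foldl (fun a risk => max a (pvRank (pvLevel risk))) a
      = max a (risks.foldl (fun a risk => max a (pvRank (pvLevel risk))) 0) := by
  induction risks generalizing a with
  | nil => simp; omega
  | cons r rs ih =>
    simp only [List.foldl_cons]
    rw [ih (max a (pvRank (pvLevel r))) (by have := pvRank_nonneg (pvLevel r); omega),
        ih (max 0 (pvRank (pvLevel r))) (by have := pvRank_nonneg (pvLevel r); omega)]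
    have := pvRank_nonneg (pvLevel r)
    omega

lemma best_eq (risks : List (List (String × String))) :
    risks.foldl (fun a risk => max a (pvRank (pvLevel risk))) 0
      = if ∃ x ∈ risks, pvLevel x = "high" then 2
        else if ∃ x ∈ risks, pvLevel x = "medium" then 1 else 0 := by
  induction risks with
  | nil => simp
  | cons r rs ih =>
    simp only [List.foldl_cons]
    rw [foldl_max_init _ _ (le_max_left 0 _), ih, pvRank_eq]
    by_cases h1 : pvLevel r = "high" <;> by_cases h2 : pvLevel r = "medium" <;>
      by_cases c1 : ∃ x ∈ rs, pvLevel x = "high" <;>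
      by_cases c2 : ∃ x ∈ rs, pvLevel x = "medium" <;>
      simp [h1, h2, c1, c2]

-- ===== VERDICT (by name: the statement is the Claim_ definition above) =====
theorem calculate_overall_risk_py_spec : Claim_equal_calculate_overall_risk_py := by
  intro risks _ _
  unfold Spec_calculate_overall_risk_py calculate_overall_risk_py calculate_overall_risk_py_alt
  rw [best_eq]
  by_cases hn : risks = []
  · simp [hn]
  · by_cases c1 : ∃ x ∈ risks, pvLevel x = "high" <;>
      by_cases c2 : ∃ x ∈ risks, pvLevel x = "medium" <;>
      simp [hn, c1, c2]
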